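-- pv_equiv track=rewrite | github.com/kurekj/sandbox-jaroslaw-kurek-2026-03-05 | kurekj/run_business_reranking_export_top3_billinggroup_ver0.10_profit_opt.py | _compress_segments
-- ===== SOURCE A (Python) =====
-- from typing import Dict, List, Tuple
--
-- LABEL_OTHER = "inne"
--
-- def _compress_segments(cols: List[str], col2group: Dict[str, str]) -> List[Tuple[str, int, int]]:
--     """Return contiguous (group_label, start_col_idx, end_col_idx) segments."""
--     if not cols:
--         return []
--     segs: List[Tuple[str, int, int]] = []
--     cur = col2group.get(cols[0], LABEL_OTHER)
--     start = 0
--     for i in range(1, len(cols)):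
--         g = col2group.get(cols[i], LABEL_OTHER)
--         if g != cur:
--             segs.append((cur, start, i - 1))
--             cur = g
--             start = i
--     segs.append((cur, start, len(cols) - 1))
--     return segs
-- ===== SOURCE B (Python) =====
-- from typing import Dict, List, Tuple
--
-- LABEL_OTHER = "inne"
--
-- def _compress_segments(cols: List[str], col2group: Dict[str, str]) -> List[Tuple[str, int, int]]:
--     """Return contiguous (group_label, start_col_idx, end_col_idx) segments.
--
--     Divide and conquer: compress each half independently, then stitch the two
--     segment lists together, fusing the seam segments when their labels match.
--     """
--     labels = [col2group.get(c, LABEL_OTHER) for c in cols]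
--
--     def seg(lo: int, hi: int) -> List[Tuple[str, int, int]]:
--         if hi - lo == 1:
--             return [(labels[lo], lo, lo)]
--         mid = (lo + hi) // 2
--         left = seg(lo, mid)
--         right = seg(mid, hi)
--         if left[-1][0] == right[0][0]:
--             lbl, s, _ = left[-1]
--             _, _, e = right[0]
--             return left[:-1] + [(lbl, s, e)] + right[1:]
--         return left + right
--
--     return [] if not cols else seg(0, len(cols))
-- ===== Notes on version B (the rewrite author's own statement) =====
-- stated objective: alternative
-- what changed: B precomputes the label list and compresses it by divide and conquer: each half is compressed recursively and the two segment lists are stitched together, fusing the seam segments when their labels match, instead of A's left-to-right index loop with cur/start state.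
import Mathlib
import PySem

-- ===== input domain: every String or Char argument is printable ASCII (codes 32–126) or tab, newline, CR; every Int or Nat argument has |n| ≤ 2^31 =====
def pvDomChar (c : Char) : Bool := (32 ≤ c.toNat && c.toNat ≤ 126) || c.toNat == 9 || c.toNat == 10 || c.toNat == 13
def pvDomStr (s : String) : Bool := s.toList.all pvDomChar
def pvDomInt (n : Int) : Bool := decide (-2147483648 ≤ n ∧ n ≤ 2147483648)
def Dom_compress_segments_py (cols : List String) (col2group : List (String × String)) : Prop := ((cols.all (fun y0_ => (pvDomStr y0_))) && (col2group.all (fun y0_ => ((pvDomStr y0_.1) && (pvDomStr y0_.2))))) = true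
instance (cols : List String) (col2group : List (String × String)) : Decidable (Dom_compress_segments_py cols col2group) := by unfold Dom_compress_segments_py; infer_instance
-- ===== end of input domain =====

-- B replaces A's left-to-right index loop by divide and conquer on the precomputed
-- label list: compress each half recursively and fuse the seam segments (alternative).


-- shared helper: col2group.get(c, "inne") (both Pythons do this lookup)
def pvGetGroup (col2group : List (String × String)) (c : String) : String :=
  (PySem.Dict.ofList col2group).getD c "inne"

-- ===== PORT A =====
def compress_segments_py (cols : List String) (col2group : List (String × String)) : List (String × Int × Int) :=
  if cols = [] then []
  else
    let cur0 := pvGetGroup col2group ((PySem.List.pyGet? cols 0).getD "")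
    let st := (PySem.List.pyRange 1 (cols.length : Int) 1).foldl
      (fun (s : List (String × Int × Int) × String × Int) i =>
        let g := pvGetGroup col2group ((PySem.List.pyGet? cols i).getD "")
        if g ≠ s.2.1 then (s.1 ++ [(s.2.1, s.2.2, i - 1)], g, i) else s)
      ([], cur0, 0)
    st.1 ++ [(st.2.1, st.2.2, (cols.length : Int) - 1)]

-- ===== PORT B =====
-- divide and conquer over [lo, hi): compress each half recursively, then stitch the
-- two segment lists, fusing the seam segments when their labels match.  The
-- `hi ≤ lo` branch is a totality guard only: B's Python calls seg solely with lo < hi.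
def pvSeg (labels : List String) (lo hi : Nat) : List (String × Int × Int) :=
  if hi - lo = 1 then [(labels.getD lo "", (lo : Int), (lo : Int))]
  else if hi ≤ lo then []
  else
    let mid := (lo + hi) / 2
    let left := pvSeg labels lo mid
    let right := pvSeg labels mid hi
    let last := left.getLastD ("", 0, 0)
    let first := right.headD ("", 0, 0)
    if last.1 = first.1 then
      left.dropLast ++ [(last.1, last.2.1, first.2.2)] ++ right.tail
    else left ++ right
termination_by hi - lo
decreasing_by all_goals omega

def compress_segments_py_alt (cols : List String) (col2group : List (String × String)) : List (String × Int × Int) :=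
  let labels := cols.map (fun c => pvGetGroup col2group c)
  if cols = [] then [] else pvSeg labels 0 cols.length

-- ===== PRECONDITION & SPEC =====
def Spec_compress_segments_py (cols : List String) (col2group : List (String × String)) (out : List (String × Int × Int)) : Prop := out = compress_segments_py_alt cols col2group
instance (cols : List String) (col2group : List (String × String)) (out : List (String × Int × Int)) : Decidable (Spec_compress_segments_py cols col2group out) := by unfold Spec_compress_segments_py; infer_instance

-- ===== CLAIM (what is proved, stated in full; the proofs are below) =====
def Claim_equal_compress_segments_py : Prop := ∀ (cols : List String) (col2group : List (String × String)), Dom_compress_segments_py cols col2group → Spec_compress_segments_py cols col2group (compress_segments_py cols col2group)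

-- ===== LEMMAS AND PROOFS =====

-- canonical description: run-length encoding of the label list, and segments from runs
def pvRunsFrom (cur : String) (n : Nat) : List String → List (String × Nat)
  | [] => [(cur, n)]
  | l :: ls => if l = cur then pvRunsFrom cur (n + 1) ls else (cur, n) :: pvRunsFrom l 1 ls

def pvRuns : List String → List (String × Nat)
  | [] => []
  | l :: ls => pvRunsFrom l 1 ls

def pvSegsOf (start : Int) : List (String × Nat) → List (String × Int × Int)
  | [] => []
  | (l, n) :: rest => (l, start, start + (n : Int) - 1) :: pvSegsOf (start + (n : Int)) rest

-- reference recursion for the A side: scan remaining labels with current label, segment start, next index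
def pvSegRec (cur : String) (start i : Int) : List String → List (String × Int × Int)
  | [] => [(cur, start, i - 1)]
  | g :: gs => if g = cur then pvSegRec cur start (i + 1) gs
               else (cur, start, i - 1) :: pvSegRec g i (i + 1) gs

-- canonical = the reference recursion
theorem segsOf_runsFrom (rest : List String) : ∀ (cur : String) (n : Nat) (start : Int),
    pvSegsOf start (pvRunsFrom cur n rest) = pvSegRec cur start (start + (n : Int)) rest := by
  induction rest with
  | nil => intro cur n start; simp [pvRunsFrom, pvSegsOf, pvSegRec]
  | cons g gs ih =>
    intro cur n start
    by_cases h : g = cur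
    · simp only [pvRunsFrom, if_pos h, pvSegRec, ih]
      congr 1
      push_cast
      ring
    · simp only [pvRunsFrom, if_neg h, pvSegsOf, pvSegRec, ih]
      push_cast
      ring_nf

-- A's loop from index k equals the reference recursion on the dropped label list
theorem a_loop_eq (cols : List String) (col2group : List (String × String)) :
    ∀ (fuel : Nat) (k : Nat) (segs : List (String × Int × Int)) (cur : String) (start : Int),
    cols.length - k = fuel → k ≤ cols.length →
    (let st := (PySem.List.pyRange (k : Int) (cols.length : Int) 1).foldl
      (fun (s : List (String × Int × Int) × String × Int) i =>
        let g := pvGetGroup col2group ((PySem.List.pyGet? cols i).getD "")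
        if g ≠ s.2.1 then (s.1 ++ [(s.2.1, s.2.2, i - 1)], g, i) else s)
      (segs, cur, start)
     st.1 ++ [(st.2.1, st.2.2, (cols.length : Int) - 1)])
    = segs ++ pvSegRec cur start (k : Int) ((cols.map (fun c => pvGetGroup col2group c)).drop k) := by
  intro fuel
  induction fuel with
  | zero =>
    intro k segs cur start hf hk
    have hk' : k = cols.length := by omega
    subst hk'
    rw [PySem.List.pyRange_one_eq_nil (by omega)]
    rw [List.drop_eq_nil_of_le (by simp)]
    simp [pvSegRec]
  | succ m ih =>
    intro k segs cur start hf hk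
    have hk' : k < cols.length := by omega
    rw [PySem.List.pyRange_one_cons (by exact_mod_cast hk')]
    have hget : PySem.List.pyGet? cols (k : Int) = some cols[k] := by
      rw [PySem.List.pyGet?_natCast]; simp [hk']
    have hdrop : (cols.map (fun c => pvGetGroup col2group c)).drop k
        = pvGetGroup col2group cols[k] :: (cols.map (fun c => pvGetGroup col2group c)).drop (k + 1) := by
      rw [List.drop_eq_getElem_cons (by simpa using hk')]
      simp
    simp only [List.foldl_cons, hget, Option.getD_some]
    by_cases h : pvGetGroup col2group cols[k] = cur
    · rw [if_neg (by simp [h])]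
      have := ih (k + 1) segs cur start (by omega) (by omega)
      simp only [Nat.cast_add, Nat.cast_one] at this
      rw [this, hdrop, pvSegRec, if_pos h]
    · rw [if_pos (by simp [h])]
      have := ih (k + 1) (segs ++ [(cur, start, (k : Int) - 1)]) (pvGetGroup col2group cols[k]) (k : Int) (by omega) (by omega)
      simp only [Nat.cast_add, Nat.cast_one] at this
      rw [this, hdrop, pvSegRec, if_neg h, List.append_assoc]
      simp

-- ---- B side: run-length lemmas ----

theorem getLastD_irrel {α : Type} (l : List α) (h : l ≠ []) (d d' : α) : l.getLastD d = l.getLastD d' := by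
  cases l with
  | nil => exact absurd rfl h
  | cons a t => rw [List.getLastD_cons, List.getLastD_cons]

theorem pvRunsFrom_ne_nil (xs : List String) : ∀ cur n, pvRunsFrom cur n xs ≠ [] := by
  induction xs with
  | nil => intro cur n; simp [pvRunsFrom]
  | cons x xs ih =>
    intro cur n
    by_cases h : x = cur
    · simpa [pvRunsFrom, h] using ih cur (n + 1)
    · simp [pvRunsFrom, h]

theorem pvRunsFrom_headD (ys : List String) : ∀ (c : String) (n : Nat), ((pvRunsFrom c n ys).headD ("", 0)).1 = c := by
  induction ys with
  | nil => intro c n; simp [pvRunsFrom]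
  | cons y ys ih =>
    intro c n
    by_cases hy : y = c
    · simpa [pvRunsFrom, hy] using ih c (n + 1)
    · simp [pvRunsFrom, hy]

theorem pvRunsFrom_append (xs : List String) : ∀ (cur : String) (n : Nat) (zs : List String),
    pvRunsFrom cur n (xs ++ zs)
      = (pvRunsFrom cur n xs).dropLast
        ++ pvRunsFrom ((pvRunsFrom cur n xs).getLastD ("", 0)).1 ((pvRunsFrom cur n xs).getLastD ("", 0)).2 zs := by
  induction xs with
  | nil => intro cur n zs; simp [pvRunsFrom]
  | cons x xs ih =>
    intro cur n zs
    by_cases h : x = cur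
    · simpa [pvRunsFrom, h] using ih cur (n + 1) zs
    · have hne := pvRunsFrom_ne_nil xs x 1
      simp only [List.cons_append, pvRunsFrom, if_neg h]
      rw [ih x 1 zs, List.dropLast_cons_of_ne_nil hne, List.getLastD_cons, List.cons_append,
        getLastD_irrel (pvRunsFrom x 1 xs) hne ("", 0) (cur, n)]

theorem pvRunsFrom_add (xs : List String) : ∀ (cur : String) (n m : Nat),
    pvRunsFrom cur (n + m) xs
      = match pvRunsFrom cur m xs with
        | [] => []
        | (l, k) :: rest => (l, k + n) :: rest := by
  induction xs with
  | nil => intro cur n m; simp [pvRunsFrom]; omega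
  | cons x xs ih =>
    intro cur n m
    by_cases h : x = cur
    · have := ih cur n (m + 1)
      simp only [pvRunsFrom, if_pos h]
      rw [show n + m + 1 = n + (m + 1) by omega, this]
    · simp [pvRunsFrom, h]; omega

theorem pvRunsFrom_sum (xs : List String) : ∀ (cur : String) (n : Nat),
    ((pvRunsFrom cur n xs).map (fun p => p.2)).sum = n + xs.length := by
  induction xs with
  | nil => intro cur n; simp [pvRunsFrom]
  | cons x xs ih =>
    intro cur n
    by_cases h : x = cur
    · simp only [pvRunsFrom, if_pos h]; rw [ih]; simp; omega
    · simp only [pvRunsFrom, if_neg h, List.map_cons, List.sum_cons]; rw [ih]; simp; omega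

theorem pvSegsOf_append (r1 : List (String × Nat)) : ∀ (r2 : List (String × Nat)) (off : Int),
    pvSegsOf off (r1 ++ r2)
      = pvSegsOf off r1 ++ pvSegsOf (off + ((r1.map (fun p => p.2)).sum : Nat)) r2 := by
  induction r1 with
  | nil => intro r2 off; simp [pvSegsOf]
  | cons p r1 ih =>
    intro r2 off
    obtain ⟨l, n⟩ := p
    simp only [List.cons_append, pvSegsOf, ih, List.map_cons, List.sum_cons]
    have e : off + (n : Int) + (((r1.map (fun p => p.2)).sum : Nat) : Int)
        = off + (((n + (r1.map (fun p => p.2)).sum : Nat) : Nat) : Int) := by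
      push_cast
      ring
    rw [e]

theorem dropLast_append_getLastD {α : Type} (l : List α) (d : α) (h : l ≠ []) :
    l.dropLast ++ [l.getLastD d] = l := by
  cases l with
  | nil => exact absurd rfl h
  | cons a t =>
    rw [List.getLastD_cons, ← List.getLast_eq_getLastD]
    exact List.dropLast_concat_getLast (by simp)

-- the seam-fusing merge of B equals canonical segments of the concatenation
theorem merge_canon (L R : List String) (off : Int) (hL : L ≠ []) (hR : R ≠ []) :
    pvSegsOf off (pvRuns (L ++ R))
      = (if ((pvSegsOf off (pvRuns L)).getLastD ("", 0, 0)).1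
            = ((pvSegsOf (off + (L.length : Int)) (pvRuns R)).headD ("", 0, 0)).1 then
          (pvSegsOf off (pvRuns L)).dropLast
            ++ [(((pvSegsOf off (pvRuns L)).getLastD ("", 0, 0)).1,
                 ((pvSegsOf off (pvRuns L)).getLastD ("", 0, 0)).2.1,
                 ((pvSegsOf (off + (L.length : Int)) (pvRuns R)).headD ("", 0, 0)).2.2)]
            ++ (pvSegsOf (off + (L.length : Int)) (pvRuns R)).tail
        else pvSegsOf off (pvRuns L) ++ pvSegsOf (off + (L.length : Int)) (pvRuns R)) := by
  obtain ⟨l0, L', rfl⟩ : ∃ a t, L = a :: t := by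
    cases L with | nil => exact absurd rfl hL | cons a t => exact ⟨a, t, rfl⟩
  obtain ⟨r0, R', rfl⟩ : ∃ a t, R = a :: t := by
    cases R with | nil => exact absurd rfl hR | cons a t => exact ⟨a, t, rfl⟩
  set P := pvRunsFrom l0 1 L' with hP
  have hPne : P ≠ [] := pvRunsFrom_ne_nil L' l0 1
  set La := (P.getLastD ("", 0)).1 with hLa
  set ka := (P.getLastD ("", 0)).2 with hka
  set S := (P.dropLast.map (fun p => p.2)).sum with hS
  have hsplit : P.dropLast ++ [(La, ka)] = P := by
    have := dropLast_append_getLastD P ("", 0) hPne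
    simpa [hLa, hka] using this
  have hsum : ((P.map (fun p => p.2)).sum : Nat) = 1 + L'.length := pvRunsFrom_sum L' l0 1
  have hsumD : S + ka = 1 + L'.length := by
    rw [hS]
    conv_rhs => rw [← hsum, ← hsplit]
    simp
  have hlen : ((l0 :: L').length : Int) = (S : Int) + (ka : Int) := by
    have h2 : (l0 :: L').length = S + ka := by
      simp only [List.length_cons]
      omega
    exact_mod_cast congrArg (fun n : Nat => (n : Int)) h2
  have hleft : pvSegsOf off (pvRuns (l0 :: L'))
      = pvSegsOf off P.dropLast
        ++ [(La, off + (S : Int), off + (S : Int) + (ka : Int) - 1)] := by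
    show pvSegsOf off P = _
    conv_lhs => rw [← hsplit]
    rw [pvSegsOf_append]
    simp [pvSegsOf, hS]
  have hcat : pvRuns ((l0 :: L') ++ (r0 :: R')) = P.dropLast ++ pvRunsFrom La ka (r0 :: R') := by
    simp only [List.cons_append, pvRuns]
    exact pvRunsFrom_append L' l0 1 (r0 :: R')
  cases hQ : pvRunsFrom r0 1 R' with
  | nil => exact absurd hQ (pvRunsFrom_ne_nil R' r0 1)
  | cons q rest =>
    obtain ⟨lq, kq⟩ := q
    have hq1 : lq = r0 := by
      have := pvRunsFrom_headD R' r0 1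
      rw [hQ] at this
      simpa using this
    have hright : pvSegsOf (off + ((l0 :: L').length : Int)) (pvRuns (r0 :: R'))
        = (lq, off + ((l0 :: L').length : Int), off + ((l0 :: L').length : Int) + (kq : Int) - 1)
          :: pvSegsOf (off + ((l0 :: L').length : Int) + (kq : Int)) rest := by
      simp only [pvRuns, hQ, pvSegsOf]
    by_cases h : La = r0
    · -- seam labels equal: the boundary runs fuse into one
      have hfuse : pvRunsFrom La ka (r0 :: R') = (lq, kq + ka) :: rest := by
        have h1 : pvRunsFrom La ka (r0 :: R') = pvRunsFrom La (ka + 1) R' := by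
          simp [pvRunsFrom, h.symm]
        rw [h1, pvRunsFrom_add R' La ka 1, h, hQ]
      rw [hcat, hfuse, pvSegsOf_append, hleft, hright]
      rw [if_pos (by simp [hq1, h])]
      simp only [pvSegsOf, List.dropLast_concat, List.getLastD_concat, List.headD_cons,
        List.tail_cons, List.append_assoc, ← hS]
      congr 2
      · congr 2
        · rw [hq1, h]
        · rw [hlen]
          push_cast
          omega
      · congr 1
        rw [hlen]
        push_cast
        omega
    · -- seam labels differ: segments simply concatenate
      have hfuse : pvRunsFrom La ka (r0 :: R') = (La, ka) :: pvRunsFrom r0 1 R' := by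
        simp only [pvRunsFrom]
        rw [if_neg (fun e : r0 = La => h e.symm)]
      have hcond : ¬ (((pvSegsOf off (pvRuns (l0 :: L'))).getLastD ("", 0, 0)).1
          = ((pvSegsOf (off + ((l0 :: L').length : Int)) (pvRuns (r0 :: R'))).headD ("", 0, 0)).1) := by
        rw [hleft, hright]
        simpa [List.getLastD_concat, hq1] using h
      rw [hcat, hfuse, if_neg hcond]
      rw [show P.dropLast ++ (La, ka) :: pvRunsFrom r0 1 R'
            = P ++ pvRunsFrom r0 1 R' from by
          rw [← List.singleton_append, ← List.append_assoc, hsplit]]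
      rw [pvSegsOf_append]
      show pvSegsOf off P ++ _ = pvSegsOf off P ++ _
      congr 2
      rw [hsum, hlen]
      push_cast
      have : (S : Int) + ka = 1 + L'.length := by exact_mod_cast hsumD
      omega

-- B's recursion computes canonical segments of its slice of the label list
theorem pvSeg_eq_canon (labels : List String) : ∀ (fuel lo hi : Nat), hi - lo ≤ fuel → lo < hi → hi ≤ labels.length →
    pvSeg labels lo hi = pvSegsOf (lo : Int) (pvRuns ((labels.drop lo).take (hi - lo))) := by
  intro fuel
  induction fuel with
  | zero => intro lo hi h1 h2 _; omega
  | succ m ih =>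
    intro lo hi hle hlt hhi
    by_cases hone : hi - lo = 1
    · have hlo : lo < labels.length := by omega
      rw [pvSeg, if_pos hone, hone]
      have htake : (labels.drop lo).take 1 = [labels[lo]] := by
        rw [List.take_one, List.head?_drop, List.getElem?_eq_getElem hlo]
        rfl
      rw [htake]
      simp [pvRuns, pvRunsFrom, pvSegsOf, List.getD_eq_getElem?_getD, List.getElem?_eq_getElem hlo]
    · have h2 : lo + 2 ≤ hi := by omega
      rw [pvSeg, if_neg hone, if_neg (by omega)]
      have hm1 : lo < (lo + hi) / 2 := by omega
      have hm2 : (lo + hi) / 2 < hi := by omega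
      have hcatL : (labels.drop lo).take ((lo + hi) / 2 - lo) ++ (labels.drop ((lo + hi) / 2)).take (hi - (lo + hi) / 2)
          = (labels.drop lo).take (hi - lo) := by
        rw [show hi - lo = ((lo + hi) / 2 - lo) + (hi - (lo + hi) / 2) by omega, List.take_add,
          List.drop_drop, show lo + ((lo + hi) / 2 - lo) = (lo + hi) / 2 by omega]
      have hLne : (labels.drop lo).take ((lo + hi) / 2 - lo) ≠ [] := by
        apply List.ne_nil_of_length_pos
        simp
        omega
      have hRne : (labels.drop ((lo + hi) / 2)).take (hi - (lo + hi) / 2) ≠ [] := by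
        apply List.ne_nil_of_length_pos
        simp
        omega
      have hLlen : (((labels.drop lo).take ((lo + hi) / 2 - lo)).length : Int) = (((lo + hi) / 2 : Nat) : Int) - ((lo : Nat) : Int) := by
        simp
        omega
      have hmid : (lo : Int) + ((((lo + hi) / 2 : Nat) : Int) - ((lo : Nat) : Int)) = (((lo + hi) / 2 : Nat) : Int) := by
        push_cast
        omega
      have mc := merge_canon ((labels.drop lo).take ((lo + hi) / 2 - lo))
        ((labels.drop ((lo + hi) / 2)).take (hi - (lo + hi) / 2)) (lo : Int) hLne hRne
      rw [hcatL, hLlen, hmid] at mc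
      show (if ((pvSeg labels lo ((lo + hi) / 2)).getLastD ("", 0, 0)).1
              = ((pvSeg labels ((lo + hi) / 2) hi).headD ("", 0, 0)).1 then
            (pvSeg labels lo ((lo + hi) / 2)).dropLast
              ++ [(((pvSeg labels lo ((lo + hi) / 2)).getLastD ("", 0, 0)).1,
                   ((pvSeg labels lo ((lo + hi) / 2)).getLastD ("", 0, 0)).2.1,
                   ((pvSeg labels ((lo + hi) / 2) hi).headD ("", 0, 0)).2.2)]
              ++ (pvSeg labels ((lo + hi) / 2) hi).tail
          else pvSeg labels lo ((lo + hi) / 2) ++ pvSeg labels ((lo + hi) / 2) hi)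
          = pvSegsOf (lo : Int) (pvRuns ((labels.drop lo).take (hi - lo)))
      rw [ih lo ((lo + hi) / 2) (by omega) hm1 (by omega),
          ih ((lo + hi) / 2) hi (by omega) hm2 hhi, mc]

-- ===== VERDICT (by name: the statement is the Claim_ definition above) =====
theorem compress_segments_py_spec : Claim_equal_compress_segments_py := by
  intro cols col2group _
  unfold Spec_compress_segments_py
  cases cols with
  | nil => simp [compress_segments_py, compress_segments_py_alt]
  | cons c cs =>
    unfold compress_segments_py compress_segments_py_alt
    rw [if_neg (by simp), if_neg (by simp)]
    have h0 : PySem.List.pyGet? (c :: cs) 0 = some c := by simp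
    simp only [h0, Option.getD_some]
    have hA := a_loop_eq (c :: cs) col2group ((c :: cs).length - 1) 1 [] (pvGetGroup col2group c) 0
      rfl (by simp)
    simp only [Nat.cast_one] at hA
    rw [hA, List.nil_append]
    rw [pvSeg_eq_canon ((c :: cs).map (fun x => pvGetGroup col2group x)) ((c :: cs).length) 0 ((c :: cs).length) (by omega) (by simp) (by simp)]
    simp only [List.drop_zero, Nat.sub_zero]
    rw [List.take_of_length_le (by simp), Nat.cast_zero]
    simp only [pvRuns, List.map_cons]
    rw [segsOf_runsFrom]
    norm_num
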